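-- pv_equiv track=rewrite | github.com/J1sooo/Algorithm | 프로그래머스/0/120861. 캐릭터의 좌표/캐릭터의 좌표.py | solution
-- ===== SOURCE A (Python) =====
-- def solution(keyinput, board):
--     answer = [0,0]
--     xlimit = board[0] // 2
--     ylimit = board[1] // 2
--
--     for i in keyinput:
--         if i=='up' and answer[1]<ylimit:
--             answer[1]+=1
--         elif i=='down' and answer[1]>-ylimit:
--             answer[1]-=1
--         elif i=='left' and answer[0]>-xlimit:
--             answer[0]-=1
--         elif i=='right' and answer[0]<xlimit:
--             answer[0]+=1
--     return answer
-- ===== SOURCE B (Python) =====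
-- def solution(keyinput, board):
--     def walk(limit, pos_key, neg_key):
--         L = max(limit // 2, 0)
--         p = 0
--         for k in keyinput:
--             if k == pos_key:
--                 p = min(L, p + 1)
--             elif k == neg_key:
--                 p = max(-L, p - 1)
--         return p
--     return [walk(board[0], 'right', 'left'), walk(board[1], 'up', 'down')]
-- ===== Notes on version B (the rewrite author's own statement) =====
-- stated objective: alternative
-- what changed: Instead of one pass over a shared [x,y] state with four guarded branches, B runs one independent bounded 1-D walk per axis (a shared helper, two staged passes), expressing each step as min/max clamp arithmetic rather than conditional moves.
-- outside the precondition, e.g. on solution(['up'], [5]): A raises IndexError, B raises IndexError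
import Mathlib
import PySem

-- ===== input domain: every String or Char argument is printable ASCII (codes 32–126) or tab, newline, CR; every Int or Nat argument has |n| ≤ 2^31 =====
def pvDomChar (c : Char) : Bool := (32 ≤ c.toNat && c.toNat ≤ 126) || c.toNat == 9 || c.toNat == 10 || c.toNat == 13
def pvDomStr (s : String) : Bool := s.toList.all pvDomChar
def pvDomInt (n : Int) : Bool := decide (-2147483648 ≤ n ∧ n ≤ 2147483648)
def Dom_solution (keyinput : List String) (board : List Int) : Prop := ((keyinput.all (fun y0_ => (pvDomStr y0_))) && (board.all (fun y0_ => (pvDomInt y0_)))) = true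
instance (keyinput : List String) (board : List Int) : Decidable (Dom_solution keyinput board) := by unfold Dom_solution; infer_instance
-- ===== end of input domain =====

-- B replaces A's single pass over a shared [x,y] state (four guarded branches) by one independent
-- bounded 1-D walk per axis, each step written as min/max clamp arithmetic (alternative; same cost).

-- ===== PORT A =====
-- one iteration of A's for-loop over keyinput; branches in A's order
def solutionStep (xlimit ylimit : Int) (answer : Int × Int) (i : String) : Int × Int :=
  if i = "up" ∧ answer.2 < ylimit then (answer.1, answer.2 + 1)
  else if i = "down" ∧ answer.2 > -ylimit then (answer.1, answer.2 - 1)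
  else if i = "left" ∧ answer.1 > -xlimit then (answer.1 - 1, answer.2)
  else if i = "right" ∧ answer.1 < xlimit then (answer.1 + 1, answer.2)
  else answer

def xlimitOf (board : List Int) : Int := PySem.Int.floordiv ((PySem.List.pyGet? board 0).getD 0) 2
def ylimitOf (board : List Int) : Int := PySem.Int.floordiv ((PySem.List.pyGet? board 1).getD 0) 2

def solution (keyinput : List String) (board : List Int) : List Int :=
  -- board[0], board[1]: in range by Pre_solution (getD 0 is never taken there)
  [(keyinput.foldl (solutionStep (xlimitOf board) (ylimitOf board)) (0, 0)).1,
   (keyinput.foldl (solutionStep (xlimitOf board) (ylimitOf board)) (0, 0)).2]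

-- ===== PORT B =====
-- one step of B's 1-D walk: clamp arithmetic on a single coordinate
def walkStep (L : Int) (pos neg : String) (p : Int) (k : String) : Int :=
  if k = pos then min L (p + 1)
  else if k = neg then max (-L) (p - 1)
  else p

-- B's helper walk(limit, pos_key, neg_key) closing over keyinput
def walk (keyinput : List String) (limit : Int) (pos neg : String) : Int :=
  keyinput.foldl (walkStep (max (PySem.Int.floordiv limit 2) 0) pos neg) 0

def solution_alt (keyinput : List String) (board : List Int) : List Int :=
  [walk keyinput ((PySem.List.pyGet? board 0).getD 0) "right" "left",
   walk keyinput ((PySem.List.pyGet? board 1).getD 0) "up" "down"]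

-- ===== PRECONDITION & SPEC =====
-- Pre_ excludes boards with fewer than 2 entries, on which A raises IndexError (board[0]/board[1]).
def Pre_solution (_keyinput : List String) (board : List Int) : Prop := 2 ≤ board.length
instance (keyinput : List String) (board : List Int) : Decidable (Pre_solution keyinput board) := by unfold Pre_solution; infer_instance
def pvWitness_solution : List String × List Int := (["up", "left", "x"], [5, 4])

def Spec_solution (keyinput : List String) (board : List Int) (out : List Int) : Prop := out = solution_alt keyinput board
instance (keyinput : List String) (board : List Int) (out : List Int) : Decidable (Spec_solution keyinput board out) := by unfold Spec_solution; infer_instance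

-- ===== CLAIM (what is proved, stated in full; the proofs are below) =====
def Claim_equal_solution : Prop := ∀ (keyinput : List String) (board : List Int), Dom_solution keyinput board → Pre_solution keyinput board → Spec_solution keyinput board (solution keyinput board)

-- ===== LEMMAS AND PROOFS =====

-- invariant: a coordinate stays within [-(max lim 0), max lim 0]
def Within (lim v : Int) : Prop := -(max lim 0) ≤ v ∧ v ≤ max lim 0

-- one A-step decomposes into B's two independent axis steps (under the invariant), which it preserves
lemma step_decomp (xl yl x y : Int) (i : String)
    (hx : Within xl x) (hy : Within yl y) :
    solutionStep xl yl (x, y) i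
      = (walkStep (max xl 0) "right" "left" x i, walkStep (max yl 0) "up" "down" y i) ∧
    Within xl (solutionStep xl yl (x, y) i).1 ∧ Within yl (solutionStep xl yl (x, y) i).2 := by
  obtain ⟨hx1, hx2⟩ := hx
  obtain ⟨hy1, hy2⟩ := hy
  by_cases h1 : i = "up"
  · subst h1
    simp only [solutionStep, walkStep, Within]
    norm_num
    split_ifs <;> simp_all <;> omega
  by_cases h2 : i = "down"
  · subst h2
    simp only [solutionStep, walkStep, Within]
    norm_num
    split_ifs <;> simp_all <;> omega
  by_cases h3 : i = "left"
  · subst h3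
    simp only [solutionStep, walkStep, Within]
    norm_num
    split_ifs <;> simp_all <;> omega
  by_cases h4 : i = "right"
  · subst h4
    simp only [solutionStep, walkStep, Within]
    norm_num
    split_ifs <;> simp_all <;> omega
  simp only [solutionStep, walkStep, Within]
  simp [h1, h2, h3, h4]
  omega

-- A's joint fold equals the pair of B's two axis folds
lemma fold_decomp (xl yl : Int) (ks : List String) :
    ∀ (x y : Int), Within xl x → Within yl y →
    ks.foldl (solutionStep xl yl) (x, y)
      = (ks.foldl (walkStep (max xl 0) "right" "left") x,
         ks.foldl (walkStep (max yl 0) "up" "down") y) := by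
  induction ks with
  | nil => intro x y _ _; rfl
  | cons k ks ih =>
    intro x y hx hy
    obtain ⟨heq, hx', hy'⟩ := step_decomp xl yl x y k hx hy
    simp only [List.foldl_cons]
    rw [show solutionStep xl yl (x, y) k
          = (walkStep (max xl 0) "right" "left" x k, walkStep (max yl 0) "up" "down" y k) from heq] at hx' hy' ⊢
    exact ih _ _ hx' hy'

-- ===== VERDICT (by name: the statement is the Claim_ definition above) =====
theorem solution_spec : Claim_equal_solution := by
  intro keyinput board _ _
  unfold Spec_solution solution solution_alt walk
  rw [fold_decomp _ _ _ 0 0 (by unfold Within; simp) (by unfold Within; simp)]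
  simp [xlimitOf, ylimitOf]
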